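-- pv_equiv track=rewrite | github.com/williamtrungle/Raman-FCD | ramanTools.py | consecutive_indices
-- ===== SOURCE A (Python) =====
-- import itertools
--
-- def consecutive_indices(X, n=1, criteria=True):
--     '''
--         Retrieve consecutive array indices with value = criteria
--
--         Usage
--         ------
--         cons_idx = consecutive_indices(X, n, criteria=True)
--
--         Input arguments
--         ----------------
--         X           --> [NDARRAY].
--         n
--         criteria    --> criteria to which compare the array values
--
--         Outputs
--         -------
--         cons_idx    --> [list] consecutive indices with a value = criteria
--     '''
--     cons_idx = []
--     for group in itertools.groupby(iter(range(len(X))), lambda x: X[x]):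
--         xi = list(group[1])
--         if group[0] == criteria and len(xi) > n:
--             for i in xi:
--                 cons_idx.append(i)
--     return cons_idx
-- ===== SOURCE B (Python) =====
-- def consecutive_indices(X, n=1, criteria=True):
--     # Per-index run-length DP: f[i] = length of the run ending at i (forward
--     # pass), b[i] = length of the run starting at i (backward pass); index i
--     # belongs to the output iff its value matches criteria and the full run
--     # containing i has length f[i] + b[i] - 1 > n.
--     m = len(X)
--     f = []
--     for i in range(m):
--         f.append(f[i - 1] + 1 if i and X[i] == X[i - 1] else 1)
--     b = [0] * m
--     for i in range(m - 1, -1, -1):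
--         b[i] = b[i + 1] + 1 if i + 1 < m and X[i] == X[i + 1] else 1
--     return [i for i in range(m) if X[i] == criteria and f[i] + b[i] - 1 > n]
-- ===== Notes on version B (the rewrite author's own statement) =====
-- stated objective: alternative
-- what changed: Replaced groupby-style run grouping and per-run emission by a per-index run-length dynamic program: a forward pass f[i] (run length ending at i) and a backward pass b[i] (run length starting at i), then a single index comprehension keeping i when X[i]==criteria and f[i]+b[i]-1 > n.
import Mathlib
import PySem

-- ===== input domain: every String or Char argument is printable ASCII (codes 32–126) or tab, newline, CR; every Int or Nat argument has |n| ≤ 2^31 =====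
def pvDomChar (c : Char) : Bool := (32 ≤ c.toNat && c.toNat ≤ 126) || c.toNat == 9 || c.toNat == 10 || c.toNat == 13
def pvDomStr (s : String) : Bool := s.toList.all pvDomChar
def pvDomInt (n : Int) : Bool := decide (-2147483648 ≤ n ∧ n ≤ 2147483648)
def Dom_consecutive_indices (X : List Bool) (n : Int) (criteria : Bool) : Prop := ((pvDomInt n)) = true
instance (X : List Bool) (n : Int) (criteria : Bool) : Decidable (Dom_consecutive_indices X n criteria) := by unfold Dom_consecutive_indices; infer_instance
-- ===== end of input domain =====

-- B replaces A's itertools.groupby run grouping by a per-index run-length dynamic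
-- program (forward pass f, backward pass b, then one index comprehension); objective: alternative.

-- ===== PORT A =====
-- A: itertools.groupby over range(len(X)) keyed by X[x]; the for-loop body
-- filters each finished group and appends its indices.  Ported as a left-to-right
-- recursion carrying the current group (value, index list), flushing on change.
def flushA (n : Int) (criteria : Bool) (acc : List Int) (v : Bool) (idxs : List Nat) : List Int :=
  if v == criteria && (idxs.length : Int) > n then acc ++ idxs.map (fun j => Int.ofNat j) else acc

def loopA (n : Int) (criteria : Bool) : List Bool → Nat → Option (Bool × List Nat) → List Int → List Int
  | [], _, none, acc => acc
  | [], _, some (v, idxs), acc => flushA n criteria acc v idxs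
  | x :: xs, i, none, acc => loopA n criteria xs (i + 1) (some (x, [i])) acc
  | x :: xs, i, some (v, idxs), acc =>
      if x == v then loopA n criteria xs (i + 1) (some (v, idxs ++ [i])) acc
      else loopA n criteria xs (i + 1) (some (x, [i])) (flushA n criteria acc v idxs)

def consecutive_indices (X : List Bool) (n : Int) (criteria : Bool) : List Int :=
  loopA n criteria X 0 none []

-- ===== PORT B =====
-- B forward pass: f.append(f[i-1] + 1 if i and X[i] == X[i-1] else 1), ported as a
-- recursion carrying the previous element (none at i = 0) and the previous f value.
def fwdB : List Bool → Option Bool → Nat → List Nat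
  | [], _, _ => []
  | x :: xs, prev, c =>
      let c' := if some x == prev then c + 1 else 1
      c' :: fwdB xs (some x) c'

-- B backward pass: b[i] = b[i+1] + 1 if i+1 < m and X[i] == X[i+1] else 1,
-- ported as the structural right-to-left recursion reading the next element and b[i+1].
def bwdB : List Bool → List Nat
  | [] => []
  | x :: xs =>
      let bs := bwdB xs
      (match xs, bs with
       | y :: _, c :: _ => if x == y then c + 1 else 1
       | _, _ => 1) :: bs

-- B: [i for i in range(m) if X[i] == criteria and f[i] + b[i] - 1 > n]; every
-- access is in range, so getD is exact here.
def consecutive_indices_alt (X : List Bool) (n : Int) (criteria : Bool) : List Int :=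
  ((List.range X.length).filter (fun i =>
      X.getD i false == criteria &&
      decide (((fwdB X none 0).getD i 0 : Int) + ((bwdB X).getD i 0 : Int) - 1 > n))).map
    (fun j => Int.ofNat j)

-- ===== PRECONDITION & SPEC =====
def Spec_consecutive_indices (X : List Bool) (n : Int) (criteria : Bool) (out : List Int) : Prop := out = consecutive_indices_alt X n criteria
instance (X : List Bool) (n : Int) (criteria : Bool) (out : List Int) : Decidable (Spec_consecutive_indices X n criteria out) := by unfold Spec_consecutive_indices; infer_instance

-- ===== CLAIM (what is proved, stated in full; the proofs are below) =====
def Claim_equal_consecutive_indices : Prop := ∀ (X : List Bool) (n : Int) (criteria : Bool), Dom_consecutive_indices X n criteria → Spec_consecutive_indices X n criteria (consecutive_indices X n criteria)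

-- ===== LEMMAS AND PROOFS =====

-- canonical run decomposition (value, start, end), left to right
def runsAux : List Bool → Bool → Nat → Nat → List (Bool × Nat × Nat)
  | [], v, s, i => [(v, s, i)]
  | x :: xs, v, s, i =>
      if x = v then runsAux xs v s (i + 1) else (v, s, i) :: runsAux xs x i (i + 1)

-- contribution of the runs to the output
def post (n : Int) (criteria : Bool) : List (Bool × Nat × Nat) → List Int
  | [] => []
  | (v, s, e) :: rest =>
      (if v == criteria && ((e : Int) - (s : Int)) > n then (List.range' s (e - s)).map (fun j => Int.ofNat j) else [])
      ++ post n criteria rest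

theorem flushA_eq (n : Int) (c : Bool) (acc : List Int) (v : Bool) (s k : Nat) :
    flushA n c acc v (List.range' s k)
      = acc ++ (if v == c && (((s + k : Nat) : Int) - (s : Int)) > n then
          (List.range' s ((s + k) - s)).map (fun j => Int.ofNat j) else []) := by
  have h1 : (((s + k : Nat) : Int) - (s : Int)) = (k : Int) := by push_cast; ring
  have h2 : (s + k) - s = k := by omega
  simp only [flushA, h1, h2, List.length_range']
  split <;> simp

theorem loopA_runs (n : Int) (c : Bool) :
    ∀ (xs : List Bool) (v : Bool) (s k : Nat) (acc : List Int),
      loopA n c xs (s + k) (some (v, List.range' s k)) acc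
        = acc ++ post n c (runsAux xs v s (s + k)) := by
  intro xs
  induction xs with
  | nil =>
      intro v s k acc
      simp [loopA, runsAux, post, flushA_eq]
  | cons x xs ih =>
      intro v s k acc
      by_cases hx : x = v
      · have hr : List.range' s k ++ [s + k] = List.range' s (k + 1) := by
          have := List.range'_concat (s := s) (n := k) (step := 1); simpa using this.symm
        have h1 : s + k + 1 = s + (k + 1) := by omega
        simp only [loopA, runsAux, hx, beq_self_eq_true, if_true, hr, h1]
        exact ih v s (k + 1) acc
      · have hb : (x == v) = false := by simp [hx]
        have hone : [s + k] = List.range' (s + k) 1 := by simp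
        simp only [loopA, runsAux, hx, hb, if_false, hone]
        have := ih x (s + k) 1 (flushA n c acc v (List.range' s k))
        rw [this, flushA_eq]
        simp [post, List.append_assoc]

-- the head of runsAux keeps the current value and start, and ends no earlier than i
theorem runsAux_head :
    ∀ (xs : List Bool) (v : Bool) (s i : Nat),
      ∃ e rest, runsAux xs v s i = (v, s, e) :: rest ∧ i ≤ e := by
  intro xs
  induction xs with
  | nil => intro v s i; exact ⟨i, [], rfl, le_refl i⟩
  | cons x xs ih =>
      intro v s i
      by_cases hx : x = v
      · obtain ⟨e, rest, heq, hle⟩ := ih v s (i + 1)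
        exact ⟨e, rest, by simp [runsAux, hx, heq], by omega⟩
      · exact ⟨i, runsAux xs x i (i + 1), by simp [runsAux, hx], le_refl i⟩

-- per-run forward counts: 1, 2, …, e - s for each run (v, s, e)
def ffRest : List (Bool × Nat × Nat) → List Nat
  | [] => []
  | (_, s, e) :: rest => List.range' 1 (e - s) ++ ffRest rest

-- per-run backward counts: e - s, …, 2, 1 for each run (v, s, e)
def bbRest : List (Bool × Nat × Nat) → List Nat
  | [] => []
  | (_, s, e) :: rest => (List.range' 1 (e - s)).reverse ++ bbRest rest

theorem fwd_runs :
    ∀ (xs : List Bool) (v : Bool) (c s i e : Nat) (rest : List (Bool × Nat × Nat)),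
      runsAux xs v s i = (v, s, e) :: rest →
      fwdB xs (some v) c = List.range' (c + 1) (e - i) ++ ffRest rest := by
  intro xs
  induction xs with
  | nil =>
      intro v c s i e rest h
      simp only [runsAux, List.cons.injEq, Prod.mk.injEq] at h
      obtain ⟨⟨-, -, he⟩, hrest⟩ := h
      subst he; subst hrest
      simp [fwdB, ffRest]
  | cons x xs ih =>
      intro v c s i e rest h
      by_cases hx : x = v
      · simp only [runsAux, if_pos hx] at h
        obtain ⟨e', rest', heq, hle⟩ := runsAux_head xs v s (i + 1)
        rw [heq] at h
        simp only [List.cons.injEq, Prod.mk.injEq] at h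
        obtain ⟨⟨-, -, he⟩, hrest⟩ := h
        rw [he, hrest] at heq
        rw [he] at hle
        have hstep : fwdB (x :: xs) (some v) c = (c + 1) :: fwdB xs (some v) (c + 1) := by
          simp [fwdB, hx]
        rw [hstep, ih v (c + 1) s (i + 1) e rest heq]
        have hk : e - i = (e - (i + 1)) + 1 := by omega
        rw [hk, List.range'_succ]
        simp
      · simp only [runsAux, if_neg hx, List.cons.injEq, Prod.mk.injEq] at h
        obtain ⟨⟨-, -, he⟩, hrest⟩ := h
        subst he; subst hrest
        obtain ⟨e', rest', heq, hle⟩ := runsAux_head xs x i (i + 1)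
        have hne : (some x == some v) = false := by simp [hx]
        have hstep : fwdB (x :: xs) (some v) c = 1 :: fwdB xs (some x) 1 := by
          simp [fwdB, hne]
        rw [hstep, ih x 1 i (i + 1) e' rest' heq, heq]
        rw [show ffRest ((x, i, e') :: rest') = List.range' 1 (e' - i) ++ ffRest rest' from rfl]
        have hk : e' - i = (e' - (i + 1)) + 1 := by omega
        rw [Nat.sub_self, List.range'_zero, List.nil_append, hk, List.range'_succ]
        simp

theorem f_eq (x : Bool) (xs : List Bool) :
    fwdB (x :: xs) none 0 = ffRest (runsAux xs x 0 1) := by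
  obtain ⟨e, rest, heq, hle⟩ := runsAux_head xs x 0 1
  have hstep : fwdB (x :: xs) none 0 = 1 :: fwdB xs (some x) 1 := by
    simp [fwdB]
  rw [hstep, fwd_runs xs x 1 0 1 e rest heq, heq]
  rw [show ffRest ((x, 0, e) :: rest) = List.range' 1 (e - 0) ++ ffRest rest from rfl]
  have hk : e - 0 = (e - 1) + 1 := by omega
  rw [hk, List.range'_succ]
  simp

theorem bwdB_step (x y : Bool) (ys : List Bool) (cv : Nat) (bs : List Nat)
    (h : bwdB (y :: ys) = cv :: bs) :
    bwdB (x :: y :: ys) = (if x == y then cv + 1 else 1) :: cv :: bs := by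
  rw [show bwdB (x :: y :: ys)
        = (match y :: ys, bwdB (y :: ys) with
           | yy :: _, cc :: _ => if x == yy then cc + 1 else 1
           | _, _ => 1) :: bwdB (y :: ys) from rfl]
  rw [h]

theorem bwd_runs :
    ∀ (xs : List Bool) (v : Bool) (s i e : Nat) (rest : List (Bool × Nat × Nat)),
      1 ≤ i →
      runsAux xs v s i = (v, s, e) :: rest →
      bwdB (v :: xs) = (List.range' 1 (e - (i - 1))).reverse ++ bbRest rest := by
  intro xs
  induction xs with
  | nil =>
      intro v s i e rest hi h
      simp only [runsAux, List.cons.injEq, Prod.mk.injEq] at h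
      obtain ⟨⟨-, -, he⟩, hrest⟩ := h
      subst he; subst hrest
      have hk : i - (i - 1) = 1 := by omega
      simp [bwdB, bbRest, hk]
  | cons x xs ih =>
      intro v s i e rest hi h
      by_cases hx : x = v
      · simp only [runsAux, if_pos hx] at h
        obtain ⟨e', rest', heq, hle⟩ := runsAux_head xs v s (i + 1)
        rw [heq] at h
        simp only [List.cons.injEq, Prod.mk.injEq] at h
        obtain ⟨⟨-, -, he⟩, hrest⟩ := h
        rw [he, hrest] at heq
        rw [he] at hle
        have htail := ih v s (i + 1) e rest (by omega) heq
        rw [show i + 1 - 1 = i from by omega] at htail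
        subst hx
        have hm : e - i = (e - (i + 1)) + 1 := by omega
        have hshape : (List.range' 1 (e - i)).reverse
            = (e - i) :: (List.range' 1 (e - (i + 1))).reverse := by
          rw [hm, List.range'_concat]
          simp
          omega
        have hbs : bwdB (x :: xs) = (e - i) :: ((List.range' 1 (e - (i + 1))).reverse ++ bbRest rest) := by
          rw [htail, hshape]; rfl
        rw [bwdB_step x x xs (e - i) ((List.range' 1 (e - (i + 1))).reverse ++ bbRest rest) hbs]
        have hkk : e - (i - 1) = (e - i) + 1 := by omega
        rw [hkk, List.range'_concat, List.reverse_append, hshape]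
        simp [List.cons.injEq]
        omega
      · simp only [runsAux, if_neg hx, List.cons.injEq, Prod.mk.injEq] at h
        obtain ⟨⟨-, -, he⟩, hrest⟩ := h
        subst he; subst hrest
        obtain ⟨e', rest', heq, hle⟩ := runsAux_head xs x i (i + 1)
        have htail := ih x i (i + 1) e' rest' (by omega) heq
        rw [show i + 1 - 1 = i from by omega] at htail
        have hm : e' - i = (e' - (i + 1)) + 1 := by omega
        have hshape : (List.range' 1 (e' - i)).reverse
            = (e' - i) :: (List.range' 1 (e' - (i + 1))).reverse := by
          rw [hm, List.range'_concat]
          simp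
          omega
        have hbs : bwdB (x :: xs) = (e' - i) :: ((List.range' 1 (e' - (i + 1))).reverse ++ bbRest rest') := by
          rw [htail, hshape]; rfl
        have hxv : (v == x) = false := by
          cases v <;> cases x <;> simp_all
        rw [heq]
        rw [bwdB_step v x xs (e' - i) ((List.range' 1 (e' - (i + 1))).reverse ++ bbRest rest') hbs]
        have hone : i - (i - 1) = 1 := by omega
        rw [hone]
        rw [show bbRest ((x, i, e') :: rest') = (List.range' 1 (e' - i)).reverse ++ bbRest rest' from rfl]
        rw [hshape]
        simp [hxv]

theorem b_eq (x : Bool) (xs : List Bool) :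
    bwdB (x :: xs) = bbRest (runsAux xs x 0 1) := by
  obtain ⟨e, rest, heq, hle⟩ := runsAux_head xs x 0 1
  rw [bwd_runs xs x 0 1 e rest (le_refl 1) heq, heq]
  rw [show bbRest ((x, 0, e) :: rest) = (List.range' 1 (e - 0)).reverse ++ bbRest rest from rfl]

-- the runs tile the index line: starts chain and every run is nonempty
def chained : Nat → List (Bool × Nat × Nat) → Prop
  | _, [] => True
  | a, r :: rest => r.2.1 = a ∧ r.2.1 < r.2.2 ∧ chained r.2.2 rest

theorem chained_runsAux :
    ∀ (xs : List Bool) (v : Bool) (s i : Nat), s < i → chained s (runsAux xs v s i) := by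
  intro xs
  induction xs with
  | nil => intro v s i h; exact ⟨rfl, h, trivial⟩
  | cons x xs ih =>
      intro v s i h
      by_cases hx : x = v
      · simp only [runsAux, if_pos hx]
        exact ih v s (i + 1) (by omega)
      · simp only [runsAux, if_neg hx]
        exact ⟨rfl, h, ih x i (i + 1) (by omega)⟩

theorem chained_mem :
    ∀ (rs : List (Bool × Nat × Nat)) (a : Nat) (v : Bool) (s e : Nat),
      chained a rs → (v, s, e) ∈ rs → a ≤ s ∧ s < e := by
  intro rs
  induction rs with
  | nil => intro a v s e _ hm; simp at hm
  | cons r rest ih =>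
      intro a v s e hch hm
      obtain ⟨h1, h2, h3⟩ := hch
      rcases List.mem_cons.mp hm with hm | hm
      · subst hm; exact ⟨le_of_eq h1.symm, h2⟩
      · obtain ⟨ha, hb⟩ := ih r.2.2 v s e h3 hm
        exact ⟨by omega, hb⟩

theorem ffRest_getD :
    ∀ (rs : List (Bool × Nat × Nat)) (a : Nat) (v : Bool) (s e j : Nat),
      chained a rs → (v, s, e) ∈ rs → s ≤ j → j < e →
      (ffRest rs).getD (j - a) 0 = j - s + 1 := by
  intro rs
  induction rs with
  | nil => intro a v s e j _ hm; simp at hm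
  | cons r rest ih =>
      intro a v s e j hch hm h1 h2
      obtain ⟨v0, s0, e0⟩ := r
      obtain ⟨ha, hlt, hch'⟩ := hch
      simp only at ha hlt hch'
      rw [show ffRest ((v0, s0, e0) :: rest) = List.range' 1 (e0 - s0) ++ ffRest rest from rfl]
      rcases List.mem_cons.mp hm with hmh | hm
      · obtain ⟨hv, hs, he⟩ : v0 = v ∧ s0 = s ∧ e0 = e := by
          simpa using hmh.symm
        have hlen : j - a < (List.range' 1 (e0 - s0)).length := by
          simp [List.length_range']; omega
        rw [List.getD_append _ _ _ _ hlen, List.getD_eq_getElem _ _ hlen]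
        simp [List.getElem_range']
        omega
      · obtain ⟨hle, _⟩ := chained_mem rest e0 v s e hch' hm
        have hlen : (List.range' 1 (e0 - s0)).length ≤ j - a := by
          simp [List.length_range']; omega
        rw [List.getD_append_right _ _ _ _ hlen]
        rw [show j - a - (List.range' 1 (e0 - s0)).length = j - e0 from by
          simp [List.length_range']; omega]
        exact ih e0 v s e j hch' hm h1 h2

theorem bbRest_getD :
    ∀ (rs : List (Bool × Nat × Nat)) (a : Nat) (v : Bool) (s e j : Nat),
      chained a rs → (v, s, e) ∈ rs → s ≤ j → j < e →
      (bbRest rs).getD (j - a) 0 = e - j := by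
  intro rs
  induction rs with
  | nil => intro a v s e j _ hm; simp at hm
  | cons r rest ih =>
      intro a v s e j hch hm h1 h2
      obtain ⟨v0, s0, e0⟩ := r
      obtain ⟨ha, hlt, hch'⟩ := hch
      simp only at ha hlt hch'
      rw [show bbRest ((v0, s0, e0) :: rest) = (List.range' 1 (e0 - s0)).reverse ++ bbRest rest from rfl]
      rcases List.mem_cons.mp hm with hmh | hm
      · obtain ⟨hv, hs, he⟩ : v0 = v ∧ s0 = s ∧ e0 = e := by
          simpa using hmh.symm
        have hlen : j - a < ((List.range' 1 (e0 - s0)).reverse).length := by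
          simp [List.length_range']; omega
        rw [List.getD_append _ _ _ _ hlen, List.getD_eq_getElem _ _ hlen]
        rw [List.getElem_reverse]
        simp [List.getElem_range']
        omega
      · obtain ⟨hle, _⟩ := chained_mem rest e0 v s e hch' hm
        have hlen : ((List.range' 1 (e0 - s0)).reverse).length ≤ j - a := by
          simp [List.length_range']; omega
        rw [List.getD_append_right _ _ _ _ hlen]
        rw [show j - a - ((List.range' 1 (e0 - s0)).reverse).length = j - e0 from by
          simp [List.length_range']; omega]
        exact ih e0 v s e j hch' hm h1 h2

-- every index inside a run carries the run's value
theorem runsAux_values (X : List Bool) :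
    ∀ (xs : List Bool) (v : Bool) (s i : Nat),
      xs = X.drop i → (∀ j, s ≤ j → j < i → X.getD j false = v) →
      ∀ r ∈ runsAux xs v s i, ∀ j, r.2.1 ≤ j → j < r.2.2 → X.getD j false = r.1 := by
  intro xs
  induction xs with
  | nil =>
      intro v s i _ hs r hr j h1 h2
      simp [runsAux] at hr
      subst hr
      exact hs j h1 h2
  | cons x xs ih =>
      intro v s i hdrop hs r hr j h1 h2
      have hx : X[i]? = some x := by
        have h0 : (X.drop i)[0]? = some x := by rw [← hdrop]; simp
        rw [List.getElem?_drop] at h0; simpa using h0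
      have hxd : X.getD i false = x := by
        simp [List.getD_eq_getElem?_getD, hx]
      have hdrop' : xs = X.drop (i + 1) := by
        rw [← List.tail_drop, ← hdrop]; rfl
      by_cases hv : x = v
      · rw [show runsAux (x :: xs) v s i = runsAux xs v s (i + 1) from by
          simp [runsAux, hv]] at hr
        refine ih v s (i + 1) hdrop' ?_ r hr j h1 h2
        intro j' hj1 hj2
        by_cases hji : j' = i
        · subst hji; rw [hxd, hv]
        · exact hs j' hj1 (by omega)
      · rw [show runsAux (x :: xs) v s i = (v, s, i) :: runsAux xs x i (i + 1) from by
          simp [runsAux, hv]] at hr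
        rcases List.mem_cons.mp hr with hr | hr
        · subst hr; exact hs j h1 h2
        · refine ih x i (i + 1) hdrop' ?_ r hr j h1 h2
          intro j' hj1 hj2
          have : j' = i := by omega
          subst this; exact hxd

-- the runs tile range' s (i + |xs| - s)
theorem runsAux_flat :
    ∀ (xs : List Bool) (v : Bool) (s i : Nat), s ≤ i →
      (runsAux xs v s i).flatMap (fun r => List.range' r.2.1 (r.2.2 - r.2.1))
        = List.range' s (i + xs.length - s) := by
  intro xs
  induction xs with
  | nil => intro v s i h; simp [runsAux]
  | cons x xs ih =>
      intro v s i h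
      by_cases hx : x = v
      · simp only [runsAux, if_pos hx]
        rw [ih v s (i + 1) (by omega)]
        congr 1
        simp [List.length_cons]; omega
      · simp only [runsAux, if_neg hx, List.flatMap_cons]
        rw [ih x i (i + 1) (by omega)]
        have h1 : i = s + (i - s) := by omega
        have := List.range'_append (s := s) (m := i - s) (n := i + 1 + xs.length - i) (step := 1)
        simp only [Nat.one_mul] at this
        rw [show s + (i - s) = i from by omega] at this
        rw [this]
        congr 1
        simp [List.length_cons]; omega

-- pushing B's filter and the Int cast under the run concatenation
theorem filtermap_flatMap (l : List (Bool × Nat × Nat)) (seg : (Bool × Nat × Nat) → List Nat) (p : Nat → Bool) :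
    ((l.flatMap seg).filter p).map (fun j => Int.ofNat j)
      = l.flatMap (fun r => (((seg r).filter p).map (fun j => Int.ofNat j))) := by
  induction l with
  | nil => simp
  | cons r l ih =>
      rw [List.flatMap_cons, List.filter_append, List.map_append, ih, List.flatMap_cons]

-- evaluating B's comprehension run by run yields post
theorem flat_filter_post (X : List Bool) (n : Int) (c : Bool) (f b : List Nat) :
    ∀ (rs : List (Bool × Nat × Nat)),
      (∀ r ∈ rs, ∀ j, r.2.1 ≤ j → j < r.2.2 →
          X.getD j false = r.1 ∧ f.getD j 0 = j - r.2.1 + 1 ∧ b.getD j 0 = r.2.2 - j) →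
      (∀ r ∈ rs, r.2.1 < r.2.2) →
      rs.flatMap (fun r =>
          (((List.range' r.2.1 (r.2.2 - r.2.1)).filter (fun i =>
              X.getD i false == c &&
              decide ((f.getD i 0 : Int) + (b.getD i 0 : Int) - 1 > n))).map (fun j => Int.ofNat j)))
        = post n c rs := by
  intro rs
  induction rs with
  | nil => intro _ _; simp [post]
  | cons r rest ih =>
      intro hval hne
      obtain ⟨v, s, e⟩ := r
      have hslt : s < e := by simpa using hne (v, s, e) List.mem_cons_self
      have hvr := hval (v, s, e) List.mem_cons_self
      simp only at hvr
      have hfilter : (List.range' s (e - s)).filter (fun i =>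
            X.getD i false == c &&
            decide ((f.getD i 0 : Int) + (b.getD i 0 : Int) - 1 > n))
          = (List.range' s (e - s)).filter (fun _ =>
              v == c && decide ((e : Int) - (s : Int) > n)) := by
        apply List.filter_congr
        intro i hi
        have hmem : s ≤ i ∧ i < e := by
          have := List.mem_range'_1.mp hi
          constructor
          · exact this.1
          · omega
        obtain ⟨hxv, hfv, hbv⟩ := hvr i hmem.1 hmem.2
        rw [hxv, hfv, hbv]
        congr 1
        rw [decide_eq_decide]
        omega
      rw [List.flatMap_cons, hfilter]
      rw [ih (fun r hr => hval r (List.mem_cons_of_mem _ hr))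
            (fun r hr => hne r (List.mem_cons_of_mem _ hr))]
      by_cases hc : (v == c && decide ((e : Int) - (s : Int) > n)) = true
      · simp [post, hc]
      · simp [post, hc]

-- B on a nonempty list computes post of the canonical runs
theorem B_runs (x : Bool) (xs : List Bool) (n : Int) (c : Bool) :
    consecutive_indices_alt (x :: xs) n c = post n c (runsAux xs x 0 1) := by
  have hch : chained 0 (runsAux xs x 0 1) := chained_runsAux xs x 0 1 (by omega)
  have hflat := runsAux_flat xs x 0 1 (by omega)
  have hval := runsAux_values (x :: xs) xs x 0 1 (by simp) (by
    intro j h1 h2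
    have : j = 0 := by omega
    subst this; simp)
  have hf := f_eq x xs
  have hb := b_eq x xs
  unfold consecutive_indices_alt
  rw [List.range_eq_range']
  have hlen : (x :: xs).length = 1 + xs.length - 0 := by simp [List.length_cons]; omega
  rw [hlen, ← hflat]
  rw [filtermap_flatMap]
  apply flat_filter_post
  · intro r hr j h1 h2
    refine ⟨hval r hr j h1 h2, ?_, ?_⟩
    · rw [hf]
      have := ffRest_getD (runsAux xs x 0 1) 0 r.1 r.2.1 r.2.2 j hch (by simpa using hr) h1 h2
      simpa using this
    · rw [hb]
      have := bbRest_getD (runsAux xs x 0 1) 0 r.1 r.2.1 r.2.2 j hch (by simpa using hr) h1 h2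
      simpa using this
  · intro r hr
    exact (chained_mem (runsAux xs x 0 1) 0 r.1 r.2.1 r.2.2 hch (by simpa using hr)).2

-- ===== VERDICT (by name: the statement is the Claim_ definition above) =====
theorem consecutive_indices_spec : Claim_equal_consecutive_indices := by
  intro X n criteria _
  unfold Spec_consecutive_indices
  cases X with
  | nil => rfl
  | cons x xs =>
      have hA : consecutive_indices (x :: xs) n criteria
          = post n criteria (runsAux xs x 0 1) := by
        have h := loopA_runs n criteria xs x 0 1 []
        simpa [consecutive_indices, loopA] using h
      rw [hA, B_runs]
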